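-- pv_equiv track=rewrite | github.com/irrawaddy28/s30-Array-5 | Problem_1.py | isRobotBoundedAntiClock
-- ===== SOURCE A (Python) =====
-- def isRobotBoundedAntiClock(instructions: str) -> bool:
--     if not instructions:
--         return True
--
--     # origin
--     x, y = 0, 0
--     i = 0 # index
--     # directions array arranged anti-clockwise
--     dirs = [[0,1], [-1,0], [0,-1], [1,0]] # North, West, South, East
--     for j in range(len(instructions)):
--         c = instructions[j]
--         if c == 'G':
--             x = x + dirs[i][0]
--             y = y + dirs[i][1]
--         elif c == 'L':
--             i = (i + 1) % 4
--         elif c == 'R':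
--             i = (i + 3) % 4
--
--     # is robot back at origin or robot not looking at North direction
--     return (x == 0 and y == 0) or (i != 0)
-- ===== SOURCE B (Python) =====
-- def isRobotBoundedAntiClock(instructions: str) -> bool:
--     # Run the instruction string four times, tracking position and a direction vector.
--     # A bounded robot is back at the origin after at most four full cycles.
--     x, y = 0, 0
--     dx, dy = 0, 1  # facing North
--     for _ in range(4):
--         for c in instructions:
--             if c == 'G':
--                 x += dx
--                 y += dy
--             elif c == 'L':
--                 dx, dy = -dy, dx
--             elif c == 'R':
--                 dx, dy = dy, -dx
--     return x == 0 and y == 0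
-- ===== Notes on version B (the rewrite author's own statement) =====
-- stated objective: alternative
-- what changed: B drops A's direction-based boundedness deduction (single pass, then 'back at origin or not facing North') and instead simulates the instruction string four full times tracking only position and a direction vector, returning whether the position is the origin.
import Mathlib
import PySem

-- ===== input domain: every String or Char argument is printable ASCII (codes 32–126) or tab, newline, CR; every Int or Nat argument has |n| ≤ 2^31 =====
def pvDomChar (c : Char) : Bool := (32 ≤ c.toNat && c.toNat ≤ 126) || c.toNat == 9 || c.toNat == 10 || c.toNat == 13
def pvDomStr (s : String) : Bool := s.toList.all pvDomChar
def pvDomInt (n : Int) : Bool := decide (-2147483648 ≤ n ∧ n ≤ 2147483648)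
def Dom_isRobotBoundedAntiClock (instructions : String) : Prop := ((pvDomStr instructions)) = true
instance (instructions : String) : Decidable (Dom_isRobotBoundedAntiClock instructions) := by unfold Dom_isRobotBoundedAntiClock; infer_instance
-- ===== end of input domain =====

-- B replaces A's single pass + direction-based test by four full simulation passes and a
-- purely positional terminal test (alternative decomposition; same asymptotic cost).

-- ===== PORT A =====
-- dirs[i][0] / dirs[i][1]: the index is always in range in A (i is kept in 0..3 by '% 4'),
-- so the .getD defaults are never taken.
def pvDirsA : List (List Int) := [[0, 1], [-1, 0], [0, -1], [1, 0]]

def pvIdx2 (xs : List (List Int)) (i k : Int) : Int :=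
  (PySem.List.pyGet? ((PySem.List.pyGet? xs i).getD []) k).getD 0

def pvStepA (st : Int × Int × Int) (c : Char) : Int × Int × Int :=
  if c = 'G' then (st.1 + pvIdx2 pvDirsA st.2.2 0, st.2.1 + pvIdx2 pvDirsA st.2.2 1, st.2.2)
  else if c = 'L' then (st.1, st.2.1, PySem.Int.mod (st.2.2 + 1) 4)
  else if c = 'R' then (st.1, st.2.1, PySem.Int.mod (st.2.2 + 3) 4)
  else st

def isRobotBoundedAntiClock (instructions : String) : Bool :=
  if instructions = "" then true
  else
    let st := instructions.toList.foldl pvStepA (0, 0, 0)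
    (st.1 == 0 && st.2.1 == 0) || (st.2.2 != 0)

-- ===== PORT B =====
def pvStepB (st : (Int × Int) × Int × Int) (c : Char) : (Int × Int) × Int × Int :=
  if c = 'G' then ((st.1.1 + st.2.1, st.1.2 + st.2.2), st.2.1, st.2.2)
  else if c = 'L' then (st.1, -st.2.2, st.2.1)
  else if c = 'R' then (st.1, st.2.2, -st.2.1)
  else st

def isRobotBoundedAntiClock_alt (instructions : String) : Bool :=
  let st := (PySem.List.pyRange 0 4 1).foldl
    (fun st _ => instructions.toList.foldl pvStepB st) ((0, 0), 0, 1)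
  st.1.1 == 0 && st.1.2 == 0

-- ===== PRECONDITION & SPEC =====
def Spec_isRobotBoundedAntiClock (instructions : String) (out : Bool) : Prop := out = isRobotBoundedAntiClock_alt instructions
instance (instructions : String) (out : Bool) : Decidable (Spec_isRobotBoundedAntiClock instructions out) := by unfold Spec_isRobotBoundedAntiClock; infer_instance

-- ===== CLAIM (what is proved, stated in full; the proofs are below) =====
def Claim_equal_isRobotBoundedAntiClock : Prop := ∀ (instructions : String), Dom_isRobotBoundedAntiClock instructions → Spec_isRobotBoundedAntiClock instructions (isRobotBoundedAntiClock instructions)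

-- ===== LEMMAS AND PROOFS =====

-- 90° counter-clockwise rotation of a direction vector.
def pvRot (v : Int × Int) : Int × Int := (-v.2, v.1)

-- direction index of A ↦ direction vector of B
def pvDirv (i : Int) : Int × Int :=
  if i = 0 then (0, 1) else if i = 1 then (-1, 0) else if i = 2 then (0, -1) else (1, 0)

-- One pass of B is a translation in the starting position.
theorem passB_affine (cs : List Char) : ∀ (px py : Int) (v : Int × Int),
    List.foldl pvStepB ((px, py), v) cs =
      ((px + (List.foldl pvStepB (((0 : Int), (0 : Int)), v) cs).1.1,
        py + (List.foldl pvStepB (((0 : Int), (0 : Int)), v) cs).1.2),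
       (List.foldl pvStepB (((0 : Int), (0 : Int)), v) cs).2) := by
  induction cs with
  | nil => intro px py v; simp
  | cons c cs ih =>
    rintro px py ⟨a, b⟩
    simp only [List.foldl, pvStepB, zero_add]
    split_ifs with hG hL hR
    · rw [ih (px + a) (py + b) (a, b), ih a b (a, b)]
      simp only [Prod.mk.injEq]
      exact ⟨⟨by ring, by ring⟩, trivial⟩
    · exact ih px py _
    · exact ih px py _
    · exact ih px py _

-- One pass of B from the origin commutes with rotating the starting direction.
theorem passB_rot (cs : List Char) : ∀ (v : Int × Int),
    List.foldl pvStepB (((0 : Int), (0 : Int)), pvRot v) cs =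
      ((pvRot (List.foldl pvStepB (((0 : Int), (0 : Int)), v) cs).1),
       (pvRot (List.foldl pvStepB (((0 : Int), (0 : Int)), v) cs).2)) := by
  induction cs with
  | nil => intro v; simp [pvRot]
  | cons c cs ih =>
    rintro ⟨a, b⟩
    simp only [List.foldl, pvStepB, pvRot, zero_add]
    split_ifs with hG hL hR
    · rw [passB_affine cs (-b) a (-b, a), passB_affine cs a b (a, b)]
      have h := ih (a, b)
      simp only [pvRot] at h
      rw [h]
      simp only [Prod.mk.injEq]
      exact ⟨⟨by ring, trivial⟩, trivial⟩
    · have h := ih (-b, a)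
      simp only [pvRot] at h
      exact h
    · have h := ih (b, -a)
      simp only [pvRot, neg_neg] at h ⊢
      exact h
    · exact ih (a, b)

-- One step of B from a state whose direction vector is pvDirv i mirrors one step of A,
-- and A keeps its direction index in [0, 4).
theorem step_corr (c : Char) (x y i : Int) (h0 : 0 ≤ i) (h4 : i < 4) :
    pvStepB ((x, y), pvDirv i) c
        = (((pvStepA (x, y, i) c).1, (pvStepA (x, y, i) c).2.1), pvDirv (pvStepA (x, y, i) c).2.2)
      ∧ 0 ≤ (pvStepA (x, y, i) c).2.2 ∧ (pvStepA (x, y, i) c).2.2 < 4 := by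
  interval_cases i <;>
    simp [pvStepA, pvStepB, pvDirv, pvIdx2, pvDirsA, PySem.Int.mod,
      PySem.List.pyGet?, PySem.List.pyIdx?] <;>
    split_ifs <;> simp_all

theorem pass_corr (cs : List Char) : ∀ (x y i : Int), 0 ≤ i → i < 4 →
    List.foldl pvStepB ((x, y), pvDirv i) cs
        = (((List.foldl pvStepA (x, y, i) cs).1, (List.foldl pvStepA (x, y, i) cs).2.1),
           pvDirv (List.foldl pvStepA (x, y, i) cs).2.2)
      ∧ 0 ≤ (List.foldl pvStepA (x, y, i) cs).2.2 ∧ (List.foldl pvStepA (x, y, i) cs).2.2 < 4 := by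
  induction cs with
  | nil => intro x y i h0 h4; exact ⟨rfl, h0, h4⟩
  | cons c cs ih =>
    intro x y i h0 h4
    obtain ⟨hstep, hs0, hs4⟩ := step_corr c x y i h0 h4
    simp only [List.foldl, hstep]
    exact ih (pvStepA (x, y, i) c).1 (pvStepA (x, y, i) c).2.1 (pvStepA (x, y, i) c).2.2 hs0 hs4

theorem rotF (cs : List Char) (v w : Int × Int) (p q : Int)
    (h : List.foldl pvStepB (((0 : Int), (0 : Int)), v) cs = ((p, q), w)) :
    List.foldl pvStepB (((0 : Int), (0 : Int)), pvRot v) cs = ((-q, p), pvRot w) := by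
  rw [passB_rot cs v, h]; rfl

theorem robot_final (s : String) : isRobotBoundedAntiClock s = isRobotBoundedAntiClock_alt s := by
  by_cases hs : s = ""
  · subst hs; decide
  · have hr : PySem.List.pyRange 0 4 1 = [0, 1, 2, 3] := by decide
    simp only [isRobotBoundedAntiClock, isRobotBoundedAntiClock_alt, if_neg hs, hr, List.foldl]
    obtain ⟨h1, hd0, hd4⟩ := pass_corr s.toList 0 0 0 (by norm_num) (by norm_num)
    rcases hA : List.foldl pvStepA (0, 0, 0) s.toList with ⟨px, py, d⟩
    rw [hA] at h1 hd0 hd4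
    rw [show pvDirv 0 = ((0 : Int), (1 : Int)) from rfl] at h1
    simp only at h1 hd0 hd4
    interval_cases d
    · -- d = 0 : direction unchanged, position px,py each pass
      rw [show pvDirv 0 = ((0 : Int), (1 : Int)) from rfl] at h1
      rw [h1, passB_affine s.toList px py (0, 1), h1,
          passB_affine s.toList (px + px) (py + py) (0, 1), h1,
          passB_affine s.toList (px + px + px) (py + py + py) (0, 1), h1]
      simp
      rw [Bool.eq_iff_iff]
      simp only [Bool.and_eq_true, beq_iff_eq]
      omega
    · -- d = 1
      rw [show pvDirv 1 = ((-1 : Int), (0 : Int)) from rfl] at h1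
      have h2 := rotF s.toList (0, 1) (-1, 0) px py h1
      simp [pvRot] at h2
      have h3 := rotF s.toList (-1, 0) (0, -1) (-py) px h2
      simp [pvRot] at h3
      have h4 := rotF s.toList (0, -1) (1, 0) (-px) (-py) h3
      simp [pvRot] at h4
      rw [h1, passB_affine s.toList px py (-1, 0), h2,
          passB_affine s.toList (px + -py) (py + px) (0, -1), h3,
          passB_affine s.toList (px + -py + -px) (py + px + -py) (1, 0), h4]
      simp
    · -- d = 2
      rw [show pvDirv 2 = ((0 : Int), (-1 : Int)) from rfl] at h1
      have h2 := rotF s.toList (0, 1) (0, -1) px py h1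
      simp [pvRot] at h2
      have h3 := rotF s.toList (-1, 0) (1, 0) (-py) px h2
      simp [pvRot] at h3
      rw [h1, passB_affine s.toList px py (0, -1), h3,
          passB_affine s.toList (px + -px) (py + -py) (0, 1), h1,
          passB_affine s.toList (px + -px + px) (py + -py + py) (0, -1), h3]
      simp
    · -- d = 3
      rw [show pvDirv 3 = ((1 : Int), (0 : Int)) from rfl] at h1
      have h2 := rotF s.toList (0, 1) (1, 0) px py h1
      simp [pvRot] at h2
      have h3 := rotF s.toList (-1, 0) (0, 1) (-py) px h2
      simp [pvRot] at h3
      have h4 := rotF s.toList (0, -1) (-1, 0) (-px) (-py) h3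
      simp [pvRot] at h4
      rw [h1, passB_affine s.toList px py (1, 0), h4,
          passB_affine s.toList (px + py) (py + -px) (0, -1), h3,
          passB_affine s.toList (px + py + -px) (py + -px + -py) (-1, 0), h2]
      simp

-- ===== VERDICT (by name: the statement is the Claim_ definition above) =====
theorem isRobotBoundedAntiClock_spec : Claim_equal_isRobotBoundedAntiClock := by
  intro s _
  unfold Spec_isRobotBoundedAntiClock
  exact robot_final s
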